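-- pv_equiv track=rewrite | github.com/manwar/perlweeklychallenge-club | challenge-339/sgreen/python/ch-2.py | peak_point
-- ===== SOURCE A (Python) =====
-- def peak_point(gains: list) -> int:
--     """
--     Calculate the highest altitude reached given a list of altitude gains.
--
--     Args:
--         gains (list): A list of integers representing altitude gains.
--
--     Returns:
--         int: The highest altitude reached.
--     """
--     current_altitude = 0
--     peak = 0
--
--     for gain in gains:
--         current_altitude += gain
--         if current_altitude > peak:
--             peak = current_altitude
--
--     return peak
-- ===== SOURCE B (Python) =====
-- def peak_point(gains: list) -> int:
--     # Backward scan: m is the best altitude reachable (floored at 0) from the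
--     # current position onward; recurrence m = max(0, g + m).  Correct because
--     # max(0, all prefix sums of g::t) = max(0, g + max(0, all prefix sums of t)).
--     m = 0
--     for g in reversed(gains):
--         m = max(0, g + m)
--     return m
-- ===== Notes on version B (the rewrite author's own statement) =====
-- stated objective: alternative
-- what changed: Replaced the forward loop that tracks a running altitude and conditionally updates a peak with a backward (right-to-left) scan maintaining a single accumulator via the max-suffix recurrence m = max(0, g + m); no running altitude or prefix sums are ever computed.
import Mathlib
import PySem

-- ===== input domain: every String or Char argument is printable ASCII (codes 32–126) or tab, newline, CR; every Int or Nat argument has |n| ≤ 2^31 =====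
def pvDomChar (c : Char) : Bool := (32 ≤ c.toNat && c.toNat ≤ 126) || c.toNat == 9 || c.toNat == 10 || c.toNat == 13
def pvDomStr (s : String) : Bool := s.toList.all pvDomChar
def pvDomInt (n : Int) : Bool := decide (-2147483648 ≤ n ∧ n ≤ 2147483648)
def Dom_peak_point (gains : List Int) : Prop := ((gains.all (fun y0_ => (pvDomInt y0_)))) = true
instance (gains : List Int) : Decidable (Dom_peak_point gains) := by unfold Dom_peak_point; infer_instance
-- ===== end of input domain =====

-- B replaces A's forward running-altitude-plus-peak loop with a backward scan
-- using the max-suffix recurrence m = max(0, g + m) (alternative algorithm, same cost).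

-- ===== PORT A =====
-- fused forward loop: state (current_altitude, peak), conditional peak update
def peak_point (gains : List Int) : Int :=
  (gains.foldl (fun (s : Int × Int) gain =>
      let c := s.1 + gain
      (c, if c > s.2 then c else s.2)) (0, 0)).2

-- ===== PORT B =====
-- for g in reversed(gains): m = max(0, g + m)
def peak_point_alt (gains : List Int) : Int :=
  gains.reverse.foldl (fun m g => max 0 (g + m)) 0

-- ===== PRECONDITION & SPEC =====
def Spec_peak_point (gains : List Int) (out : Int) : Prop := out = peak_point_alt gains
instance (gains : List Int) (out : Int) : Decidable (Spec_peak_point gains out) := by unfold Spec_peak_point; infer_instance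

-- ===== CLAIM (what is proved, stated in full; the proofs are below) =====
def Claim_equal_peak_point : Prop := ∀ (gains : List Int), Dom_peak_point gains → Spec_peak_point gains (peak_point gains)

-- ===== LEMMAS AND PROOFS =====

-- B's backward fold as a structural right fold
theorem alt_eq_foldr (gains : List Int) :
    peak_point_alt gains = gains.foldr (fun g m => max 0 (g + m)) 0 := by
  unfold peak_point_alt
  rw [List.foldl_reverse]

-- B's value is always nonnegative
theorem foldr_nonneg (gains : List Int) :
    0 ≤ gains.foldr (fun g m => max 0 (g + m)) 0 := by
  cases gains with
  | nil => simp
  | cons g t => simp [List.foldr]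

-- invariant for A's loop: from state (c, p) with p ≥ c the result is max p (c + B)
theorem loopA_eq (gains : List Int) : ∀ (c p : Int), c ≤ p →
    (gains.foldl (fun (s : Int × Int) gain =>
        let x := s.1 + gain
        (x, if x > s.2 then x else s.2)) (c, p)).2
      = max p (c + gains.foldr (fun g m => max 0 (g + m)) 0) := by
  induction gains with
  | nil => intro c p h; simp; omega
  | cons g t ih =>
    intro c p h
    simp only [List.foldl, List.foldr]
    rw [ih (c + g) (if c + g > p then c + g else p) (by split_ifs <;> omega)]
    have ht := foldr_nonneg t
    split_ifs <;> omega

-- ===== VERDICT (by name: the statement is the Claim_ definition above) =====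
theorem peak_point_spec : Claim_equal_peak_point := by
  intro gains _
  unfold Spec_peak_point peak_point
  rw [alt_eq_foldr, loopA_eq gains 0 0 le_rfl]
  have := foldr_nonneg gains
  omega
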